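-- pv_equiv track=rewrite | github.com/neochen2701/TQCPans | 程式設計：資料結構答案檔/Python/505.py | getOneZeroIndex_Column
-- ===== SOURCE A (Python) =====
-- def needOne(data:list)->int:
--     for i in range(1,len(data)+1):
--         if data.count(i)==0:
--             return i
--
-- def getOneZeroIndex_eachRow(board: list)->int:
--     if board.count(0)!=1: return -1
--     for i in range(len(board)):
--         if board[i]==0:
--             return i
--
-- def getOneZeroIndex_Column(board:list)->list:
--     change = 0
--     for col in range(len(board)):
--         column = [board[i][col] for i in range(len(board))]
--         index =getOneZeroIndex_eachRow(column)
--         if index !=-1: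
--             num = needOne(column)
--             board[index][col]=num
--             change = change + 1
--     return change
-- ===== SOURCE B (Python) =====
-- def getOneZeroIndex_Column(board):
--     # Row-major sweep: fold each row into per-column stat triples (zero count, zero row,
--     # nonzero values), then fill the exactly-one-zero columns, finding the missing value
--     # by a gap scan over the sorted distinct values.  Mutates board in place like A.
--     n = len(board)
--     stats = [(0, -1, [])] * n
--     for r, row in enumerate(board):
--         stats = [((z + 1, r, vs) if row[c] == 0 else (z, zr, vs + [row[c]]))
--                  for c, (z, zr, vs) in enumerate(stats)]
--     change = 0
--     for c, (z, zr, vs) in enumerate(stats):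
--         if z == 1:
--             need = 1
--             for v in sorted(set(vs)):
--                 if v == need:
--                     need += 1
--                 elif v > need:
--                     break
--             board[zr][c] = need
--             change += 1
--     return change
-- ===== Notes on version B (the rewrite author's own statement) =====
-- stated objective: alternative
-- what changed: Instead of A's column-major loop that re-extracts each column and scans it repeatedly (count zeros, find the zero's index, probe each candidate 1..n with list.count), B makes one row-major sweep folding every row into per-column stat triples (zero count, zero row, nonzero values) and then fills each one-zero column, finding the missing value by a gap scan over the sorted distinct values.
import Mathlib
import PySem

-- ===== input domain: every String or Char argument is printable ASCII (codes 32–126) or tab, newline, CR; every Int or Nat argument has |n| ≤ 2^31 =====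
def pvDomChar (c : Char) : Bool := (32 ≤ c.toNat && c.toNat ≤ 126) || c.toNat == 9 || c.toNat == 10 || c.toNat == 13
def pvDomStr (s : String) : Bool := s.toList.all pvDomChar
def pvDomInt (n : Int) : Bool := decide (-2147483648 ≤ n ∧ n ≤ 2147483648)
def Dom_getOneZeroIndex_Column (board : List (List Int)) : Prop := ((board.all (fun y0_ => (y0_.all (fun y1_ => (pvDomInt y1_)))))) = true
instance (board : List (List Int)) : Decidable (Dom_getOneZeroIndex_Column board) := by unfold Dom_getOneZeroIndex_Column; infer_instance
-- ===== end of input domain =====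

-- B replaces A's column-major triple-scan loop by a row-major sweep that folds every row into
-- per-column stat triples, then fills the one-zero columns via a sorted-distinct gap scan; both
-- mutate the board in place, the proved equivalence is about the return value.


-- ===== PORT A =====
def needOne (data : List Int) : Option Int :=
  (PySem.List.pyRange 1 ((data.length : Int) + 1) 1).find? (fun i => PySem.List.count data i == 0)

def getOneZeroIndex_eachRow (board : List Int) : Int :=
  if PySem.List.count board 0 ≠ 1 then -1
  else (((PySem.List.pyRange 0 (board.length : Int) 1).find?
          (fun i => PySem.List.pyGetD board i 0 == 0)).getD (-1))
  -- the `.getD (-1)` branch is unreachable: with count 0 = 1 a zero index is always found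

def aStep (st : List (List Int) × Int) (col : Int) : List (List Int) × Int :=
  let b := st.1
  let column := (PySem.List.pyRange 0 (b.length : Int) 1).map
      (fun i => PySem.List.pyGetD (PySem.List.pyGetD b i []) col 0)
  let index := getOneZeroIndex_eachRow column
  if index ≠ -1 then
    -- needOne never returns none here (with exactly one zero some value in 1..n is absent)
    let num := (needOne column).getD 0
    (PySem.List.pySetD b index (PySem.List.pySetD (PySem.List.pyGetD b index []) col num), st.2 + 1)
  else st

def getOneZeroIndex_Column (board : List (List Int)) : Int :=
  ((PySem.List.pyRange 0 (board.length : Int) 1).foldl aStep (board, 0)).2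

-- ===== PORT B =====
-- one row of the row-major sweep: zip the stat triples with the row and update each
def bRowStep (stats : List (Int × Int × List Int)) (p : Int × List Int) : List (Int × Int × List Int) :=
  (PySem.List.enumerate stats 0).map (fun q =>
    if PySem.List.pyGetD p.2 q.1 0 = 0 then (q.2.1 + 1, p.1, q.2.2.2)
    else (q.2.1, q.2.2.1, q.2.2.2 ++ [PySem.List.pyGetD p.2 q.1 0]))

-- the gap scan: `need = 1; for v in sorted(set(vs)): …` with the break as a base case
def bGap : Int → List Int → Int
  | need, [] => need
  | need, v :: t => if v = need then bGap (need + 1) t else if v > need then need else bGap need t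

def bFillStep (st : List (List Int) × Int) (p : Int × (Int × Int × List Int)) : List (List Int) × Int :=
  if p.2.1 = 1 then
    let need := bGap 1 (PySem.List.sorted (PySem.Set.ofList p.2.2.2) (fun x => x))
    (PySem.List.pySetD st.1 p.2.2.1
       (PySem.List.pySetD (PySem.List.pyGetD st.1 p.2.2.1 []) p.1 need), st.2 + 1)
  else st

def getOneZeroIndex_Column_alt (board : List (List Int)) : Int :=
  let stats := (PySem.List.enumerate board 0).foldl bRowStep
      (List.replicate board.length ((0 : Int), (-1 : Int), ([] : List Int)))
  ((PySem.List.enumerate stats 0).foldl bFillStep (board, 0)).2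

-- ===== PRECONDITION & SPEC =====
-- Pre_ excludes exactly the inputs where Python A raises IndexError: a row shorter than the
-- number of rows makes board[i][col] fail.
def Pre_getOneZeroIndex_Column (board : List (List Int)) : Prop :=
  ∀ row ∈ board, board.length ≤ row.length
instance (board : List (List Int)) : Decidable (Pre_getOneZeroIndex_Column board) := by
  unfold Pre_getOneZeroIndex_Column; infer_instance

def pvWitness_getOneZeroIndex_Column : List (List Int) := [[0, 2], [1, 0]]

def Spec_getOneZeroIndex_Column (board : List (List Int)) (out : Int) : Prop :=
  out = getOneZeroIndex_Column_alt board
instance (board : List (List Int)) (out : Int) : Decidable (Spec_getOneZeroIndex_Column board out) := by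
  unfold Spec_getOneZeroIndex_Column; infer_instance

-- ===== CLAIM (what is proved, stated in full; the proofs are below) =====
def Claim_equal_getOneZeroIndex_Column : Prop := ∀ (board : List (List Int)), Dom_getOneZeroIndex_Column board → Pre_getOneZeroIndex_Column board → Spec_getOneZeroIndex_Column board (getOneZeroIndex_Column board)

-- ===== LEMMAS AND PROOFS =====

-- the column A extracts from the current board state
def colA (b : List (List Int)) (col : Int) : List Int :=
  (PySem.List.pyRange 0 (b.length : Int) 1).map
    (fun i => PySem.List.pyGetD (PySem.List.pyGetD b i []) col 0)

theorem pyGetD_set_ne {α : Type} (l : List α) (k : Nat) (v : α) (j : Int) (d : α)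
    (hj : 0 ≤ j) (h : j ≠ (k : Int)) :
    PySem.List.pyGetD (l.set k v) j d = PySem.List.pyGetD l j d := by
  have hjk : k ≠ j.toNat := by omega
  simp [PySem.List.pyGetD, PySem.List.pyGet?_of_nonneg _ hj, List.getElem?_set_ne hjk]

theorem pyGetD_set_self {α : Type} (l : List α) (k : Nat) (v : α) (d : α)
    (hk : k < l.length) :
    PySem.List.pyGetD (l.set k v) (k : Int) d = v := by
  simp only [PySem.List.pyGetD, PySem.List.pyGet?_of_nonneg _ (by positivity : (0:Int) ≤ (k:Int)),
    Int.toNat_natCast, List.getElem?_set_self hk, Option.getD_some]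

-- A's in-place write to column `col` leaves every other column extraction unchanged
theorem colA_set_other (b : List (List Int)) (k : Nat) (col c num : Int)
    (hc : 0 ≤ c) (hcol : 0 ≤ col) (hne : c ≠ col) :
    colA (PySem.List.pySetD b (k : Int)
            (PySem.List.pySetD (PySem.List.pyGetD b (k : Int) []) col num)) c = colA b c := by
  unfold colA
  rw [PySem.List.length_pySetD]
  apply List.map_congr_left
  intro i hi
  have hi0 : 0 ≤ i := (PySem.List.mem_pyRange_one.mp hi).1
  rw [PySem.List.pySetD_natCast]
  by_cases hik : i = (k : Int)
  · subst hik
    by_cases hk : k < b.length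
    · rw [pyGetD_set_self b k _ _ hk]
      rw [PySem.List.pySetD_of_nonneg _ num hcol]
      exact pyGetD_set_ne _ col.toNat num c 0 hc (by omega)
    · rw [List.set_eq_of_length_le (by omega)]
  · rw [pyGetD_set_ne b k _ i _ hi0 hik]

theorem count_one_split (c : List Int) (h : c.count 0 = 1) :
    ∃ pre suf, c = pre ++ 0 :: suf ∧ (0 : Int) ∉ pre ∧ (0 : Int) ∉ suf := by
  have hm : (0 : Int) ∈ c := by
    rw [← List.count_pos_iff]; omega
  obtain ⟨pre, suf, rfl⟩ := List.append_of_mem hm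
  refine ⟨pre, suf, rfl, ?_, ?_⟩ <;>
  · rw [← List.count_eq_zero]
    simp [List.count_append] at h ⊢
    omega

theorem findA_eq (pre suf : List Int) (h1 : (0 : Int) ∉ pre) :
    (PySem.List.pyRange 0 (((pre ++ 0 :: suf).length : Int)) 1).find?
        (fun i => PySem.List.pyGetD (pre ++ 0 :: suf) i 0 == 0) = some (pre.length : Int) := by
  have hsplit := PySem.List.pyRange_one_append 0 (pre.length : Int) ((pre ++ 0 :: suf).length : Int)
    (by positivity) (by simp only [List.length_append, List.length_cons]; push_cast; omega)
  rw [hsplit, List.find?_append]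
  have hnone : (PySem.List.pyRange 0 (pre.length : Int) 1).find?
      (fun i => PySem.List.pyGetD (pre ++ 0 :: suf) i 0 == 0) = none := by
    rw [List.find?_eq_none]
    intro i hi
    rw [PySem.List.mem_pyRange_one] at hi
    rw [PySem.List.pyGetD_eq_getElem _ 0 hi.1 (by simp only [List.length_append, List.length_cons]; push_cast; omega)]
    simp only [beq_iff_eq]
    rw [List.getElem_append_left (by omega)]
    intro h0
    exact h1 (h0 ▸ List.getElem_mem _)
  rw [hnone, Option.none_or]
  rw [PySem.List.pyRange_one_cons (by simp only [List.length_append, List.length_cons]; push_cast; omega)]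
  rw [List.find?_cons]
  have : PySem.List.pyGetD (pre ++ 0 :: suf) (pre.length : Int) 0 = 0 := by
    rw [PySem.List.pyGetD_eq_getElem _ 0 (by positivity) (by simp only [List.length_append, List.length_cons]; push_cast; omega)]
    simp
  simp [this]

-- A's per-column index: the zero's position when the count is 1, else -1
theorem eachRow_of_count_one (c : List Int) (pre suf : List Int)
    (hsp : c = pre ++ 0 :: suf) (hp0 : (0 : Int) ∉ pre) (h : c.count 0 = 1) :
    getOneZeroIndex_eachRow c = (pre.length : Int) := by
  unfold getOneZeroIndex_eachRow
  rw [if_neg (by simp [PySem.List.count_eq, h])]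
  rw [hsp, findA_eq pre suf hp0]
  rfl

theorem eachRow_of_count_ne (c : List Int) (h : c.count 0 ≠ 1) :
    getOneZeroIndex_eachRow c = -1 := by
  unfold getOneZeroIndex_eachRow
  rw [if_pos (by simp [PySem.List.count_eq, h])]

-- A's fold counts exactly the columns (of the untouched board) holding a single zero
theorem A_fold (cols : List Int) (g : Int → List Int) :
    ∀ (b : List (List Int)) (ch : Int),
    cols.Pairwise (· ≠ ·) → (∀ c ∈ cols, 0 ≤ c) → (∀ c ∈ cols, colA b c = g c) →
    (cols.foldl aStep (b, ch)).2
      = ch + (cols.countP (fun c => (g c).count 0 == 1) : Int) := by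
  induction cols with
  | nil => intro b ch _ _ _; simp
  | cons col rest ih =>
    intro b ch hpw hnn hcol
    have hpw' := (List.pairwise_cons.mp hpw).2
    have hhead := (List.pairwise_cons.mp hpw).1
    have hcolb : colA b col = g col := hcol col (by simp)
    have hcol0 : 0 ≤ col := hnn col (by simp)
    rw [List.foldl_cons]
    have hstep : aStep (b, ch) col
        = if (g col).count 0 == 1 then
            (PySem.List.pySetD b (getOneZeroIndex_eachRow (g col))
              (PySem.List.pySetD
                (PySem.List.pyGetD b (getOneZeroIndex_eachRow (g col)) [])
                col ((needOne (g col)).getD 0)), ch + 1)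
          else (b, ch) := by
      simp only [aStep]
      rw [show (PySem.List.pyRange 0 ((b.length : Int)) 1).map
            (fun i => PySem.List.pyGetD (PySem.List.pyGetD b i []) col 0) = g col from hcolb]
      by_cases h1 : (g col).count 0 = 1
      · obtain ⟨pre, suf, hsp, hp0, _⟩ := count_one_split _ h1
        rw [eachRow_of_count_one _ pre suf hsp hp0 h1]
        simp only [h1, beq_self_eq_true, if_true]
        rw [if_pos (by omega : ¬((pre.length : Int) = -1))]
      · rw [eachRow_of_count_ne _ h1]
        simp [h1]
    rw [hstep]
    by_cases h1 : (g col).count 0 = 1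
    · obtain ⟨pre, suf, hsp, hp0, _⟩ := count_one_split _ h1
      rw [if_pos (by simp [h1])]
      rw [eachRow_of_count_one _ pre suf hsp hp0 h1]
      rw [ih _ _ hpw' (fun c hc => hnn c (by simp [hc]))
          (fun c hc => by
            rw [colA_set_other b pre.length col c _ (hnn c (by simp [hc])) hcol0
                (Ne.symm (hhead c hc))]
            exact hcol c (by simp [hc]))]
      rw [List.countP_cons]
      simp [h1]
      omega
    · rw [if_neg (by simp [h1])]
      rw [ih _ _ hpw' (fun c hc => hnn c (by simp [hc])) (fun c hc => hcol c (by simp [hc]))]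
      rw [List.countP_cons]
      simp [h1]

-- B's row sweep: each column's zero-counter accumulates the zeros seen so far in that column
theorem B_stats (rs : List (List Int)) :
    ∀ (s : Int) (stats : List (Int × Int × List Int)),
    ((PySem.List.enumerate rs s).foldl bRowStep stats).length = stats.length ∧
    ∀ (c : Nat) (hc : c < stats.length) (hc' : c < ((PySem.List.enumerate rs s).foldl bRowStep stats).length),
      (((PySem.List.enumerate rs s).foldl bRowStep stats)[c]'hc').1
        = (stats[c]'hc).1
          + (rs.countP (fun row => PySem.List.pyGetD row (c : Int) 0 == 0) : Int) := by
  induction rs with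
  | nil => intro s stats; simp [PySem.List.enumerate_nil]
  | cons r rs ih =>
    intro s stats
    rw [PySem.List.enumerate_cons, List.foldl_cons]
    have hlen1 : (bRowStep stats (s, r)).length = stats.length := by
      simp [bRowStep]
    have helem : ∀ (c : Nat) (hc : c < stats.length),
        (bRowStep stats (s, r))[c]'(by omega)
          = if PySem.List.pyGetD r (c : Int) 0 = 0
            then ((stats[c]'hc).1 + 1, s, (stats[c]'hc).2.2)
            else ((stats[c]'hc).1, (stats[c]'hc).2.1,
                  (stats[c]'hc).2.2 ++ [PySem.List.pyGetD r (c : Int) 0]) := by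
      intro c hc
      simp [bRowStep, PySem.List.getElem_enumerate]
    obtain ⟨ihl, ihv⟩ := ih (s + 1) (bRowStep stats (s, r))
    refine ⟨by rw [ihl, hlen1], ?_⟩
    intro c hc hc'
    rw [ihv c (by omega) (by omega), helem c hc]
    rw [List.countP_cons]
    by_cases h0 : r[c]?.getD 0 = 0
    · simp [h0]; ring
    · simp [h0]

-- B's fill fold: the change counter counts the stat triples whose zero count is 1
theorem B_fill (l : List (Int × (Int × Int × List Int))) :
    ∀ (b : List (List Int)) (ch : Int),
    (l.foldl bFillStep (b, ch)).2 = ch + (l.countP (fun p => p.2.1 == 1) : Int) := by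
  induction l with
  | nil => intro b ch; simp
  | cons p t ih =>
    intro b ch
    rw [List.foldl_cons, List.countP_cons]
    by_cases h1 : p.2.1 = 1
    · rw [show bFillStep (b, ch) p
          = (PySem.List.pySetD b p.2.2.1
              (PySem.List.pySetD (PySem.List.pyGetD b p.2.2.1 []) p.1
                (bGap 1 (PySem.List.sorted (PySem.Set.ofList p.2.2.2) (fun x => x)))), ch + 1)
        from by simp [bFillStep, h1]]
      rw [ih]
      simp [h1]
      omega
    · rw [show bFillStep (b, ch) p = (b, ch) from by simp [bFillStep, h1]]
      rw [ih]
      simp [h1]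
  -- the board component written by bFillStep is irrelevant to the returned counter

-- enumerating the stat triples does not change which of them have zero count 1
theorem countP_enumerate_one (l : List (Int × Int × List Int)) (s : Int) :
    (PySem.List.enumerate l s).countP (fun p => p.2.1 == 1) = l.countP (fun st => st.1 == 1) := by
  induction l generalizing s with
  | nil => simp [PySem.List.enumerate_nil]
  | cons a t ih => rw [PySem.List.enumerate_cons]; simp [List.countP_cons, ih]

-- counting a pointwise property of a list's elements as a count over its index range
theorem countP_eq_range {α : Type} (l : List α) (p : α → Bool) (q : Nat → Bool)
    (h : ∀ (c : Nat) (hc : c < l.length), p (l[c]'hc) = q c) :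
    l.countP p = (List.range l.length).countP q := by
  induction l generalizing q with
  | nil => simp
  | cons a t ih =>
    rw [List.countP_cons, List.length_cons, List.range_succ_eq_map, List.countP_cons,
        List.countP_map]
    have hcomp : (q ∘ Nat.succ) = fun k => q (k + 1) := by
      funext k; simp [Nat.succ_eq_add_one]
    rw [hcomp, ih (fun k => q (k + 1)) (fun c hc => by
      simpa using h (c + 1) (by simpa using Nat.succ_lt_succ hc))]
    have h0 := h 0 (by simp)
    simp only [List.getElem_cons_zero] at h0
    rw [h0]

-- ===== VERDICT (by name: the statement is the Claim_ definition above) =====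
theorem getOneZeroIndex_Column_spec : Claim_equal_getOneZeroIndex_Column := by
  intro board _ hpre
  unfold Spec_getOneZeroIndex_Column getOneZeroIndex_Column getOneZeroIndex_Column_alt
  -- A's change counter = number of one-zero columns of the original board
  have hAcol : ∀ c ∈ PySem.List.pyRange 0 (board.length : Int) 1,
      colA board c = board.map (fun row => PySem.List.pyGetD row c 0) := by
    intro c _
    unfold colA
    rw [show (fun i => PySem.List.pyGetD (PySem.List.pyGetD board i []) c 0)
        = ((fun row => PySem.List.pyGetD row c 0) ∘ (fun j => PySem.List.pyGetD board j [])) from rfl,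
      ← List.map_map, PySem.List.map_pyGetD_pyRange_zero' board ([] : List Int)]
  have hA := A_fold (PySem.List.pyRange 0 (board.length : Int) 1)
      (fun c => board.map (fun row => PySem.List.pyGetD row c 0)) board 0
      ((PySem.List.pairwise_lt_pyRange_one 0 (board.length : Int)).imp (fun h => ne_of_lt h))
      (fun c hc => (PySem.List.mem_pyRange_one.mp hc).1) hAcol
  beta_reduce at hA
  -- B's stats: the zero counter of column c is the zero count of column c of the board
  have hstats := B_stats board 0
      (List.replicate board.length ((0 : Int), (-1 : Int), ([] : List Int)))
  set stats := (PySem.List.enumerate board 0).foldl bRowStep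
      (List.replicate board.length ((0 : Int), (-1 : Int), ([] : List Int))) with hsdef
  have hslen : stats.length = board.length := by simpa using hstats.1
  rw [hA, B_fill, countP_enumerate_one stats 0]
  -- both counts, re-indexed over List.range of the same length
  rw [countP_eq_range stats (fun st => st.1 == 1)
      (fun c => board.countP (fun row => PySem.List.pyGetD row (c : Int) 0 == 0) == 1)
      (fun c hc => by
        have hv := hstats.2 c (by simpa using (hslen ▸ hc)) hc
        simp only [List.getElem_replicate] at hv
        have hcast : ∀ (N : Nat), (((N : Int)) == (1 : Int)) = (N == 1) := by
          intro N
          by_cases h : N = 1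
          · simp [h]
          · have h1 : (N : Int) ≠ 1 := by exact_mod_cast h
            simp [h, h1]
        show ((stats[c]'hc).1 == 1)
            = (board.countP (fun row => PySem.List.pyGetD row (c : Int) 0 == 0) == 1)
        rw [hv, zero_add]
        exact hcast _)]
  rw [countP_eq_range (PySem.List.pyRange 0 (board.length : Int) 1)
      (fun c => List.count 0 (board.map (fun row => PySem.List.pyGetD row c 0)) == 1)
      (fun c => board.countP (fun row => PySem.List.pyGetD row (c : Int) 0 == 0) == 1)
      (fun c hc => by
        simp only [PySem.List.getElem_pyRange_one, zero_add]
        rw [List.count_eq_countP, List.countP_map]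
        rfl)]
  rw [hslen, PySem.List.length_pyRange_one]
  simp
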